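-- pv_equiv track=rewrite | github.com/autistic-symposium/master-algorithms-py | book/ebook_src/real_interview_problems/other_resources/Top-Coder/2013/tco2013_round3_3b_div1.py | findAllPossibleNext
-- ===== SOURCE A (Python) =====
-- def findAllPossibleNext(sumsTone, T, n_music):
--     sumsTone2 = []
--     for i, song1 in enumerate(sumsTone):
--         index1 = song1[1]
--         for j in range(i+1, len(sumsTone)):
--             song2 = sumsTone[j]
--             index2 = song2[1]
--             if index1 == index2:
--                 sum_here = song1[0] + song2[0]
--                 if sum_here < T:
--                     sumsTone2.append((sum_here, song2[1], song2[2], n_music))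
--
--
--     return sumsTone2
-- ===== SOURCE B (Python) =====
-- def findAllPossibleNext(sumsTone, T, n_music):
--     # group positions by index value, then walk only matching entries
--     pairs = [(song[1], (pos, song)) for pos, song in enumerate(sumsTone)]
--     buckets = {}
--     for key, entry in pairs:
--         buckets.setdefault(key, []).append(entry)
--     out = []
--     for i, song1 in enumerate(sumsTone):
--         for pos, song2 in buckets.get(song1[1], []):
--             if pos > i:
--                 s = song1[0] + song2[0]
--                 if s < T:
--                     out.append((s, song2[1], song2[2], n_music))
--     return out
-- ===== Notes on version B (the rewrite author's own statement) =====
-- stated objective: alternative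
-- what changed: B pre-groups the entries into a dict keyed by index value and, for each position i, walks only the matching-index bucket entries with position > i, replacing A's inner scan over the whole suffix by a direct walk of matching entries.
import Mathlib
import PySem

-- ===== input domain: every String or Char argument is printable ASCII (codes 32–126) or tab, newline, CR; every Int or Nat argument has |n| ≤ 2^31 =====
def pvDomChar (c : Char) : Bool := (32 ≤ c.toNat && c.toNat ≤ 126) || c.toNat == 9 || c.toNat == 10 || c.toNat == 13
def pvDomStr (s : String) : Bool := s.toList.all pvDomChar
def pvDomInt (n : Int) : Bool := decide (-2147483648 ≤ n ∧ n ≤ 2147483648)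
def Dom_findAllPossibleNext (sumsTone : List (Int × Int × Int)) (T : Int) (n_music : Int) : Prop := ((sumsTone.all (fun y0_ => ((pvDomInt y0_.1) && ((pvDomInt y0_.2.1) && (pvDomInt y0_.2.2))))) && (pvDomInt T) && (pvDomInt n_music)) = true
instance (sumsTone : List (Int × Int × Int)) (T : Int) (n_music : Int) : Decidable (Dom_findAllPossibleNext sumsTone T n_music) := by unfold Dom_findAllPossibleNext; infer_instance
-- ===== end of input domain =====

-- B groups entries by index value into a dict of (position, song) buckets and walks only the
-- matching bucket tail, instead of A's inner scan over the whole suffix (objective: alternative).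

-- ===== PORT A =====
def findAllPossibleNext (sumsTone : List (Int × Int × Int)) (T : Int) (n_music : Int) : List (Int × Int × Int × Int) :=
  (PySem.List.enumerate sumsTone).foldl (fun acc e =>
    (PySem.List.pyRange (e.1 + 1) sumsTone.length 1).foldl (fun acc2 j =>
      let song2 := PySem.List.pyGetD sumsTone j (0, 0, 0)
      if e.2.2.1 == song2.2.1 then
        if e.2.1 + song2.1 < T then acc2 ++ [(e.2.1 + song2.1, song2.2.1, song2.2.2, n_music)]
        else acc2
      else acc2) acc) []

-- ===== PORT B =====
def findAllPossibleNext_alt (sumsTone : List (Int × Int × Int)) (T : Int) (n_music : Int) : List (Int × Int × Int × Int) :=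
  let pairs := (PySem.List.enumerate sumsTone).map (fun q => (q.2.2.1, q))
  let buckets := pairs.foldl (fun d p => d.modify p.1 [] (· ++ [p.2])) PySem.Dict.empty
  (PySem.List.enumerate sumsTone).foldl (fun acc e =>
    (buckets.getD e.2.2.1 []).foldl (fun acc2 q =>
      if e.1 < q.1 then
        if e.2.1 + q.2.1 < T then acc2 ++ [(e.2.1 + q.2.1, q.2.2.1, q.2.2.2, n_music)]
        else acc2
      else acc2) acc) []

-- ===== PRECONDITION & SPEC =====
def Spec_findAllPossibleNext (sumsTone : List (Int × Int × Int)) (T : Int) (n_music : Int) (out : List (Int × Int × Int × Int)) : Prop := out = findAllPossibleNext_alt sumsTone T n_music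
instance (sumsTone : List (Int × Int × Int)) (T : Int) (n_music : Int) (out : List (Int × Int × Int × Int)) : Decidable (Spec_findAllPossibleNext sumsTone T n_music out) := by unfold Spec_findAllPossibleNext; infer_instance

-- ===== CLAIM (what is proved, stated in full; the proofs are below) =====
def Claim_equal_findAllPossibleNext : Prop := ∀ (sumsTone : List (Int × Int × Int)) (T : Int) (n_music : Int), Dom_findAllPossibleNext sumsTone T n_music → Spec_findAllPossibleNext sumsTone T n_music (findAllPossibleNext sumsTone T n_music)

-- ===== LEMMAS AND PROOFS =====

-- the common value of both inner loops, as filter-then-map over the enumeration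
def pvInner (sumsTone : List (Int × Int × Int)) (T : Int) (n_music : Int) (e : Int × Int × Int × Int) : List (Int × Int × Int × Int) :=
  ((PySem.List.enumerate sumsTone).filter
    (fun q => decide (e.1 < q.1) && (q.2.2.1 == e.2.2.1) && decide (e.2.1 + q.2.1 < T))).map
    (fun q => (e.2.1 + q.2.1, q.2.2.1, q.2.2.2, n_music))

theorem filter_pyRange_lt (i L : Int) (hi : 0 ≤ i) :
    (PySem.List.pyRange 0 L 1).filter (fun j => decide (i < j)) = PySem.List.pyRange (i + 1) L 1 := by
  by_cases h : i + 1 ≤ L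
  · rw [PySem.List.pyRange_one_append 0 (i + 1) L (by omega) h, List.filter_append]
    have h1 : (PySem.List.pyRange 0 (i + 1) 1).filter (fun j => decide (i < j)) = [] := by
      rw [List.filter_eq_nil_iff]
      intro j hj
      have := (PySem.List.mem_pyRange_one).mp hj
      simp; omega
    have h2 : (PySem.List.pyRange (i + 1) L 1).filter (fun j => decide (i < j)) = PySem.List.pyRange (i + 1) L 1 := by
      rw [List.filter_eq_self]
      intro j hj
      have := (PySem.List.mem_pyRange_one).mp hj
      simp; omega
    rw [h1, h2, List.nil_append]
  · rw [show PySem.List.pyRange (i + 1) L 1 = [] from PySem.List.pyRange_one_eq_nil (by omega),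
      List.filter_eq_nil_iff]
    intro j hj
    have := (PySem.List.mem_pyRange_one).mp hj
    simp; omega

theorem innerA_eq (sumsTone : List (Int × Int × Int)) (T n_music : Int)
    (e : Int × Int × Int × Int) (he : 0 ≤ e.1) (acc : List (Int × Int × Int × Int)) :
    (PySem.List.pyRange (e.1 + 1) sumsTone.length 1).foldl (fun acc2 j =>
      let song2 := PySem.List.pyGetD sumsTone j (0, 0, 0)
      if e.2.2.1 == song2.2.1 then
        if e.2.1 + song2.1 < T then acc2 ++ [(e.2.1 + song2.1, song2.2.1, song2.2.2, n_music)]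
        else acc2
      else acc2) acc = acc ++ pvInner sumsTone T n_music e := by
  rw [PySem.List.foldl_congr_mem (g := fun acc2 j =>
      if ((e.2.2.1 == (PySem.List.pyGetD sumsTone j (0, 0, 0)).2.1)
          && decide (e.2.1 + (PySem.List.pyGetD sumsTone j (0, 0, 0)).1 < T)) = true
      then acc2 ++ [(e.2.1 + (PySem.List.pyGetD sumsTone j (0, 0, 0)).1,
          (PySem.List.pyGetD sumsTone j (0, 0, 0)).2.1,
          (PySem.List.pyGetD sumsTone j (0, 0, 0)).2.2, n_music)] else acc2)
      (h := by intro acc2 j _; simp only [Bool.and_eq_true, decide_eq_true_eq]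
               split_ifs <;> simp_all)]
  rw [PySem.List.foldl_append_if]
  congr 1
  unfold pvInner
  rw [PySem.List.enumerate_eq_map_pyRange (d := (0, 0, 0)), List.filter_map, List.map_map]
  simp only [PySem.List.len_eq, Function.comp_def]
  rw [← filter_pyRange_lt e.1 (sumsTone.length : Int) he, List.filter_filter]
  congr 1
  apply List.filter_congr
  intro j _
  rw [Bool.eq_iff_iff]
  simp only [Bool.and_eq_true, decide_eq_true_eq, beq_iff_eq, @eq_comm Int]
  tauto

theorem bucket_eq (sumsTone : List (Int × Int × Int)) (c : Int) :
    (((PySem.List.enumerate sumsTone).map (fun q => (q.2.2.1, q))).foldl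
      (fun d p => d.modify p.1 [] (· ++ [p.2])) PySem.Dict.empty).getD c [] =
    (PySem.List.enumerate sumsTone).filter (fun q => q.2.2.1 == c) := by
  rw [PySem.Dict.getD_foldl_modify_append, PySem.Dict.getD_empty, List.nil_append,
    List.filter_map, List.map_map]
  simp only [Function.comp_def]
  exact (List.map_id _)

theorem innerB_eq (sumsTone : List (Int × Int × Int)) (T n_music : Int)
    (e : Int × Int × Int × Int) (acc : List (Int × Int × Int × Int)) :
    ((PySem.List.enumerate sumsTone).filter (fun q => q.2.2.1 == e.2.2.1)).foldl (fun acc2 q =>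
      if e.1 < q.1 then
        if e.2.1 + q.2.1 < T then acc2 ++ [(e.2.1 + q.2.1, q.2.2.1, q.2.2.2, n_music)]
        else acc2
      else acc2) acc = acc ++ pvInner sumsTone T n_music e := by
  rw [PySem.List.foldl_congr_mem (g := fun acc2 q =>
      if (decide (e.1 < q.1) && decide (e.2.1 + q.2.1 < T)) = true
      then acc2 ++ [(e.2.1 + q.2.1, q.2.2.1, q.2.2.2, n_music)] else acc2)
      (h := by intro acc2 q _; simp only [Bool.and_eq_true, decide_eq_true_eq]
               split_ifs <;> simp_all)]
  rw [PySem.List.foldl_append_if]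
  congr 1
  unfold pvInner
  rw [List.filter_filter]
  congr 1
  apply List.filter_congr
  intro q _
  rw [Bool.eq_iff_iff]
  simp only [Bool.and_eq_true, decide_eq_true_eq, beq_iff_eq, @eq_comm Int]
  tauto

-- ===== VERDICT (by name: the statement is the Claim_ definition above) =====
theorem findAllPossibleNext_spec : Claim_equal_findAllPossibleNext := by
  intro sumsTone T n_music _
  unfold Spec_findAllPossibleNext
  have hA : findAllPossibleNext sumsTone T n_music
      = (PySem.List.enumerate sumsTone).foldl (fun acc e => acc ++ pvInner sumsTone T n_music e) [] := by
    unfold findAllPossibleNext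
    rw [PySem.List.foldl_congr_mem' (g := fun acc e => acc ++ pvInner sumsTone T n_music e)
      (h := by
        intro e he acc
        have h0 : 0 ≤ e.1 := by
          rcases (PySem.List.mem_enumerate_iff sumsTone 0 e).mp he with ⟨k, hk, rfl⟩
          simp
        exact innerA_eq sumsTone T n_music e h0 acc)]
  have hB : findAllPossibleNext_alt sumsTone T n_music
      = (PySem.List.enumerate sumsTone).foldl (fun acc e => acc ++ pvInner sumsTone T n_music e) [] := by
    dsimp only [findAllPossibleNext_alt]
    rw [PySem.List.foldl_congr_mem' (g := fun acc e => acc ++ pvInner sumsTone T n_music e)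
      (h := by
        intro e he acc
        rw [bucket_eq sumsTone e.2.2.1]
        exact innerB_eq sumsTone T n_music e acc)]
  rw [hA, hB]
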